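-- pv_equiv track=rewrite | github.com/pypi-data/pypi-mirror-170 | packages/tensossht/tensossht-0.7.0-py3-none-any.whl/tensossht/specialfunctions/trapani.py | symmetrized_index
-- ===== SOURCE A (Python) =====
-- from typing import Optional, Tuple, Type, Union, cast
--
-- def ncoeffs(l: int) -> int:
--     """Number of coefficients with 0 <= m_1 <= m_2 <= l."""
--     return ((l + 3) * l) // 2 + 1
--
-- def linear_index(m1: int, m2: int) -> int:
--     """Linear index for a given (m1, m2) triplet."""
--     assert m2 >= 0 and m2 <= m1
--     return 0 if m1 == m2 == 0 else ncoeffs(m1 - 1) + m2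
--
-- def symmetrized_index(l: int, m1: int, m2: int, factor: int = 1) -> Tuple[int, int]:
--     """Computes index and factor to go from compressed results to full tensor.
--
--     Only 0 <= m2 <= m1 are represented in the recursion. Given l, and any general m1 and
--     m2, this funtion outputs the index and factor needed to recover the full symmetrized
--     wignerd value.
--
--     Example:
--
--         Evidently, this function does not do much when it tries to access those elements
--         that are explictly present in the compressed form:
--
--         >>> from tensossht.specialfunctions.trapani import (
--         ...     recursion_tensor as R, symmetrized_index, linear_index
--         ... )
--         >>> compressed = R(5) @ R(4) @ R(3) @ R(2) @ R(1) @ R(0)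
--         >>> index, factor = symmetrized_index(5, 4, 3)
--         >>> factor == 1
--         True
--         >>> index == linear_index(4, 3)
--         True
--
--         We can check against the wigner-d function that the correct factor was
--         recovered.
--
--         >>> from pytest import approx
--         >>> from tensossht.specialfunctions import naive
--         >>> index, factor = symmetrized_index(5, -4, -3)
--         >>> index, factor
--         (13, -1)
--         >>> float(compressed[index] * factor)== approx(naive.wignerd(5, -4, -3))
--         True
--
--     """
--     if abs(m1) > l or abs(m2) > l:
--         return 0, 0
--     if m2 <= m1 and m2 >= 0:
--         return linear_index(m1, m2), factor
--     if m1 < 0 and m2 < 0: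
--         return symmetrized_index(l, -m2, -m1, factor)
--     if m1 < 0:
--         return symmetrized_index(l, -m1, m2, factor if (l - m2) % 2 == 0 else -factor)
--     if m2 < 0:
--         return symmetrized_index(l, m1, -m2, factor if (l - m1) % 2 == 0 else -factor)
--     return symmetrized_index(l, m2, m1, factor if (m2 - m1) % 2 == 0 else -factor)
-- ===== SOURCE B (Python) =====
-- def symmetrized_index(l, m1, m2, factor=1):
--     """Closed-form: canonicalize to 0 <= lo <= hi by taking absolute values
--     (transposing when both are negative) and accumulate the sign exponent
--     directly instead of recursing."""
--     if abs(m1) > l or abs(m2) > l: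
--         return 0, 0
--     e = 0
--     if m1 < 0 <= m2:
--         e = l - m2
--     elif m2 < 0 <= m1:
--         e = l - m1
--     if m1 < 0 and m2 < 0:
--         p, q = abs(m2), abs(m1)
--     else:
--         p, q = abs(m1), abs(m2)
--     if q > p:
--         e += q - p
--         hi, lo = q, p
--     else:
--         hi, lo = p, q
--     index = ((hi + 2) * (hi - 1)) // 2 + 1 + lo
--     return index, factor if e % 2 == 0 else -factor
-- ===== Notes on version B (the rewrite author's own statement) =====
-- stated objective: simpler
-- what changed: A's chain of up-to-three sign-flipping tail-recursive calls is replaced by a single closed-form pass that computes the canonical (hi, lo) pair from absolute values (transposed when both are negative) and accumulates the total sign exponent before one parity test.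
import Mathlib
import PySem

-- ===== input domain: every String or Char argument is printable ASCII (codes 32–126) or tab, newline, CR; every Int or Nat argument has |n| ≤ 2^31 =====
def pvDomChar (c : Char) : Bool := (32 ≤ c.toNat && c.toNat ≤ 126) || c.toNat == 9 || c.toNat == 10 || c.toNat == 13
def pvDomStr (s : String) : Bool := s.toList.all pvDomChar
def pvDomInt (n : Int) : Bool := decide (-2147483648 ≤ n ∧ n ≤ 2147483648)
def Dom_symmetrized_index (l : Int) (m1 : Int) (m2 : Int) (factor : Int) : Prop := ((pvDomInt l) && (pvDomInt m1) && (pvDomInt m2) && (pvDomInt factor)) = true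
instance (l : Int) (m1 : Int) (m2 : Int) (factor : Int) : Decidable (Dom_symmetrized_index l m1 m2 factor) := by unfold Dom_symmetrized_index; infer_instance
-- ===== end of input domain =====

-- B replaces A's mutual chain of sign-flipping tail recursions by a single closed-form
-- computation of the canonical (hi, lo) pair and the total sign exponent (objective: simpler).

-- ===== PORT A =====

-- Python's abs on int
def pyAbs (x : Int) : Int := if x < 0 then -x else x

def ncoeffsA (l : Int) : Int := PySem.Int.floordiv ((l + 3) * l) 2 + 1

def linearIndexA (m1 : Int) (m2 : Int) : Int :=
  if m1 = m2 ∧ m2 = 0 then 0 else ncoeffsA (m1 - 1) + m2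

def symmetrized_index (l : Int) (m1 : Int) (m2 : Int) (factor : Int) : Int × Int :=
  if pyAbs m1 > l ∨ pyAbs m2 > l then (0, 0)
  else if m2 ≤ m1 ∧ 0 ≤ m2 then (linearIndexA m1 m2, factor)
  else if m1 < 0 ∧ m2 < 0 then symmetrized_index l (-m2) (-m1) factor
  else if m1 < 0 then
    symmetrized_index l (-m1) m2 (if PySem.Int.mod (l - m2) 2 = 0 then factor else -factor)
  else if m2 < 0 then
    symmetrized_index l m1 (-m2) (if PySem.Int.mod (l - m1) 2 = 0 then factor else -factor)
  else
    symmetrized_index l m2 m1 (if PySem.Int.mod (m2 - m1) 2 = 0 then factor else -factor)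
termination_by
  (2 * (if m1 < 0 then 1 else 0) + 2 * (if m2 < 0 then 1 else 0)
    + (if 0 ≤ m1 ∧ 0 ≤ m2 ∧ m1 < m2 then 1 else 0) : Nat)
decreasing_by
  all_goals (split_ifs <;> omega)

-- ===== PORT B =====
def symmetrized_index_alt (l : Int) (m1 : Int) (m2 : Int) (factor : Int) : Int × Int :=
  if pyAbs m1 > l ∨ pyAbs m2 > l then (0, 0)
  else
    let e0 : Int := if m1 < 0 ∧ 0 ≤ m2 then l - m2
                    else if m2 < 0 ∧ 0 ≤ m1 then l - m1 else 0
    let p : Int := if m1 < 0 ∧ m2 < 0 then pyAbs m2 else pyAbs m1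
    let q : Int := if m1 < 0 ∧ m2 < 0 then pyAbs m1 else pyAbs m2
    let e : Int := if q > p then e0 + (q - p) else e0
    let hi : Int := if q > p then q else p
    let lo : Int := if q > p then p else q
    (PySem.Int.floordiv ((hi + 2) * (hi - 1)) 2 + 1 + lo,
     if PySem.Int.mod e 2 = 0 then factor else -factor)

-- ===== PRECONDITION & SPEC =====
def Spec_symmetrized_index (l : Int) (m1 : Int) (m2 : Int) (factor : Int) (out : Int × Int) : Prop := out = symmetrized_index_alt l m1 m2 factor
instance (l : Int) (m1 : Int) (m2 : Int) (factor : Int) (out : Int × Int) : Decidable (Spec_symmetrized_index l m1 m2 factor out) := by unfold Spec_symmetrized_index; infer_instance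

-- ===== CLAIM (what is proved, stated in full; the proofs are below) =====
def Claim_equal_symmetrized_index : Prop := ∀ (l : Int) (m1 : Int) (m2 : Int) (factor : Int), Dom_symmetrized_index l m1 m2 factor → Spec_symmetrized_index l m1 m2 factor (symmetrized_index l m1 m2 factor)



-- ===== LEMMAS AND PROOFS =====

theorem pymod_two (x : Int) : PySem.Int.mod x 2 = x % 2 :=
  PySem.Int.mod_eq_emod_of_pos (by norm_num)

theorem alt_guard (l m1 m2 f : Int) (h : pyAbs m1 > l ∨ pyAbs m2 > l) :
    symmetrized_index_alt l m1 m2 f = (0, 0) := by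
  simp only [symmetrized_index_alt, if_pos h]

theorem alt_canon (l m1 m2 f : Int) (h2 : 0 ≤ m2) (h3 : m2 ≤ m1) (g : m1 ≤ l) :
    symmetrized_index_alt l m1 m2 f =
      (PySem.Int.floordiv ((m1 + 2) * (m1 - 1)) 2 + 1 + m2, f) := by
  simp only [symmetrized_index_alt, pyAbs, pymod_two,
    if_neg (show ¬(m1 < 0) by omega), if_neg (show ¬(m2 < 0) by omega),
    if_neg (show ¬(m1 > l ∨ m2 > l) by omega),
    if_neg (show ¬(m1 < 0 ∧ 0 ≤ m2) by omega),
    if_neg (show ¬(m2 < 0 ∧ 0 ≤ m1) by omega),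
    if_neg (show ¬(m1 < 0 ∧ m2 < 0) by omega),
    if_neg (show ¬(m2 > m1) by omega)]
  norm_num

theorem alt_negneg (l m1 m2 f : Int) (h1 : m1 < 0) (h2 : m2 < 0)
    (g1 : -l ≤ m1) (g2 : -l ≤ m2) :
    symmetrized_index_alt l (-m2) (-m1) f = symmetrized_index_alt l m1 m2 f := by
  simp only [symmetrized_index_alt, pyAbs, pymod_two,
    if_pos h1, if_pos h2, if_pos (And.intro h1 h2),
    if_neg (show ¬(-m2 < 0) by omega), if_neg (show ¬(-m1 < 0) by omega),
    if_neg (show ¬(-m2 > l ∨ -m1 > l) by omega),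
    if_neg (show ¬(-m1 > l ∨ -m2 > l) by omega),
    if_neg (show ¬(m1 < 0 ∧ 0 ≤ m2) by omega),
    if_neg (show ¬(m2 < 0 ∧ 0 ≤ m1) by omega),
    if_neg (show ¬(-m2 < 0 ∧ 0 ≤ -m1) by omega),
    if_neg (show ¬(-m1 < 0 ∧ 0 ≤ -m2) by omega),
    if_neg (show ¬(-m2 < 0 ∧ -m1 < 0) by omega)]

theorem alt_negpos (l m1 m2 f : Int) (h1 : m1 < 0) (h2 : 0 ≤ m2)
    (g1 : -l ≤ m1) (g2 : m2 ≤ l) :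
    symmetrized_index_alt l (-m1) m2 (if PySem.Int.mod (l - m2) 2 = 0 then f else -f) =
      symmetrized_index_alt l m1 m2 f := by
  simp only [symmetrized_index_alt, pyAbs, pymod_two,
    if_pos h1, if_pos (And.intro h1 h2),
    if_neg (show ¬(m2 < 0) by omega), if_neg (show ¬(-m1 < 0) by omega),
    if_neg (show ¬(-m1 > l ∨ m2 > l) by omega),
    if_neg (show ¬(m1 < 0 ∧ m2 < 0) by omega),
    if_neg (show ¬(-m1 < 0 ∧ 0 ≤ m2) by omega),
    if_neg (show ¬(m2 < 0 ∧ 0 ≤ -m1) by omega),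
    if_neg (show ¬(-m1 < 0 ∧ m2 < 0) by omega)]
  by_cases hq : m2 > -m1
  · simp only [if_pos hq, Prod.mk.injEq]
    refine ⟨trivial, ?_⟩
    split_ifs <;> omega
  · simp only [if_neg hq, Prod.mk.injEq]
    refine ⟨trivial, ?_⟩
    split_ifs <;> omega

theorem alt_posneg (l m1 m2 f : Int) (h1 : 0 ≤ m1) (h2 : m2 < 0)
    (g1 : m1 ≤ l) (g2 : -l ≤ m2) :
    symmetrized_index_alt l m1 (-m2) (if PySem.Int.mod (l - m1) 2 = 0 then f else -f) =
      symmetrized_index_alt l m1 m2 f := by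
  simp only [symmetrized_index_alt, pyAbs, pymod_two,
    if_pos h2, if_pos (And.intro h2 h1),
    if_neg (show ¬(m1 < 0) by omega), if_neg (show ¬(-m2 < 0) by omega),
    if_neg (show ¬(m1 > l ∨ -m2 > l) by omega),
    if_neg (show ¬(m1 < 0 ∧ m2 < 0) by omega),
    if_neg (show ¬(m1 < 0 ∧ 0 ≤ m2) by omega),
    if_neg (show ¬(m1 < 0 ∧ 0 ≤ -m2) by omega),
    if_neg (show ¬(-m2 < 0 ∧ 0 ≤ m1) by omega),
    if_neg (show ¬(m1 < 0 ∧ -m2 < 0) by omega)]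
  by_cases hq : -m2 > m1
  · simp only [if_pos hq, Prod.mk.injEq]
    refine ⟨trivial, ?_⟩
    split_ifs <;> omega
  · simp only [if_neg hq, Prod.mk.injEq]
    refine ⟨trivial, ?_⟩
    split_ifs <;> omega

theorem alt_swap (l m1 m2 f : Int) (h1 : 0 ≤ m1) (h2 : 0 ≤ m2) (h3 : m1 < m2)
    (g2 : m2 ≤ l) :
    symmetrized_index_alt l m2 m1 (if PySem.Int.mod (m2 - m1) 2 = 0 then f else -f) =
      symmetrized_index_alt l m1 m2 f := by
  rw [alt_canon l m2 m1 _ h1 (by omega) g2]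
  simp only [symmetrized_index_alt, pyAbs, pymod_two,
    if_neg (show ¬(m1 < 0) by omega), if_neg (show ¬(m2 < 0) by omega),
    if_neg (show ¬(m1 > l ∨ m2 > l) by omega),
    if_neg (show ¬(m1 < 0 ∧ 0 ≤ m2) by omega),
    if_neg (show ¬(m2 < 0 ∧ 0 ≤ m1) by omega),
    if_neg (show ¬(m1 < 0 ∧ m2 < 0) by omega),
    if_pos (show m2 > m1 by omega), Prod.mk.injEq]
  refine ⟨trivial, ?_⟩
  split_ifs <;> omega

theorem linearIndexA_eq (m1 m2 : Int) (h2 : 0 ≤ m2) (h3 : m2 ≤ m1) :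
    linearIndexA m1 m2 = PySem.Int.floordiv ((m1 + 2) * (m1 - 1)) 2 + 1 + m2 := by
  unfold linearIndexA ncoeffsA
  split_ifs with h
  · obtain ⟨e1, e2⟩ := h
    subst e2; rw [e1]; decide
  · rw [show (m1 - 1 + 3) * (m1 - 1) = (m1 + 2) * (m1 - 1) from by ring]

theorem A_eq_alt (l m1 m2 f : Int) :
    symmetrized_index l m1 m2 f = symmetrized_index_alt l m1 m2 f := by
  fun_induction symmetrized_index l m1 m2 f with
  | case1 m1 m2 f h =>
      rw [alt_guard l m1 m2 f h]
  | case2 m1 m2 f h hc =>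
      have hm1 : m1 ≤ l := by
        simp only [pyAbs] at h; split_ifs at h <;> omega
      rw [alt_canon l m1 m2 f hc.2 hc.1 hm1, linearIndexA_eq m1 m2 hc.2 hc.1]
  | case3 m1 m2 f h hc hn ih =>
      rw [ih]
      simp only [pyAbs] at h
      exact alt_negneg l m1 m2 f hn.1 hn.2 (by split_ifs at h <;> omega)
        (by split_ifs at h <;> omega)
  | case4 m1 m2 f h hc hn h1 ih =>
      simp only [dite_eq_ite] at ih
      rw [ih]
      simp only [pyAbs] at h
      exact alt_negpos l m1 m2 f h1 (by omega) (by split_ifs at h <;> omega)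
        (by split_ifs at h <;> omega)
  | case5 m1 m2 f h hc hn h1 h2 ih =>
      simp only [dite_eq_ite] at ih
      rw [ih]
      simp only [pyAbs] at h
      exact alt_posneg l m1 m2 f (by omega) h2 (by split_ifs at h <;> omega)
        (by split_ifs at h <;> omega)
  | case6 m1 m2 f h hc hn h1 h2 ih =>
      simp only [dite_eq_ite] at ih
      rw [ih]
      simp only [pyAbs] at h
      exact alt_swap l m1 m2 f (by omega) (by omega) (by omega)
        (by split_ifs at h <;> omega)

-- ===== VERDICT (by name: the statement is the Claim_ definition above) =====
theorem symmetrized_index_spec : Claim_equal_symmetrized_index := by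
  intro l m1 m2 factor _
  exact A_eq_alt l m1 m2 factor
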